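-- pv_equiv track=rewrite | github.com/shivam675/Python-Programming-lab | AA.py | AmsN
-- ===== SOURCE A (Python) =====
-- def AmsN (x):				# Function definition
--    sum=0				# Initiating sum
--    t=x					# Temporary variable
--    while (t>0):   			# initating while loop
--       d=t%10
--       sum += d**3
--       t = t//10
--    if sum==x:
--       return "Amstrong number"
--    else:
--       return "Not An Amstrong number"
-- ===== SOURCE B (Python) =====
-- def AmsN(x):
--     total = sum(int(c) ** 3 for c in str(x)) if x > 0 else 0
--     return "Amstrong number" if total == x else "Not An Amstrong number"
-- ===== Notes on version B (the rewrite author's own statement) =====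
-- stated objective: idiomatic
-- what changed: B sums the cubes of the characters of the number's decimal string (skipping the string path for non-positive inputs exactly as A's while loop does) instead of peeling digits arithmetically with mod and floor division.
import Mathlib
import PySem

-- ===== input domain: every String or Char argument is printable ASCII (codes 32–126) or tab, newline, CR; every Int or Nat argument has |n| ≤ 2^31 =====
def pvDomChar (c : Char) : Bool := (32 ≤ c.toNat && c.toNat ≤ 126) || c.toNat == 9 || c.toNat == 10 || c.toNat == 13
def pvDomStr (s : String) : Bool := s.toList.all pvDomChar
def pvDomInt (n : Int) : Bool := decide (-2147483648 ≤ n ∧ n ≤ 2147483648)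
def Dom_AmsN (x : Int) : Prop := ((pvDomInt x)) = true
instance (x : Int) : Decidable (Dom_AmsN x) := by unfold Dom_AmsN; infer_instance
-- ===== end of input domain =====

-- B replaces A's %10-//10 while loop with a sum of digit cubes over the decimal string (idiomatic; same cost).

-- ===== PORT A =====
-- the while loop: state (t, sum)
def AmsN.loop (t : Int) (sum : Int) : Int :=
  if _h : t > 0 then
    AmsN.loop (PySem.Int.floordiv t 10) (sum + (PySem.Int.mod t 10) ^ 3)
  else sum
termination_by t.toNat
decreasing_by
  simp only [PySem.Int.floordiv, Int.fdiv_eq_ediv_of_nonneg t (by omega : (0:Int) ≤ 10)]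
  omega

def AmsN (x : Int) : String :=
  let sum := AmsN.loop x 0
  if sum = x then "Amstrong number" else "Not An Amstrong number"

-- ===== PORT B =====
-- int(c) on a single decimal-digit char (all str(x) yields for x > 0) is its code minus 48: exact here.
def AmsN_alt (x : Int) : String :=
  let total : Int :=
    if x > 0 then ((PySem.Int.toChars x).map (fun c => ((c.toNat : Int) - 48) ^ 3)).sum else 0
  if total = x then "Amstrong number" else "Not An Amstrong number"

-- ===== PRECONDITION & SPEC =====
def Spec_AmsN (x : Int) (out : String) : Prop := out = AmsN_alt x
instance (x : Int) (out : String) : Decidable (Spec_AmsN x out) := by unfold Spec_AmsN; infer_instance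

-- ===== CLAIM (what is proved, stated in full; the proofs are below) =====
def Claim_equal_AmsN : Prop := ∀ (x : Int), Dom_AmsN x → Spec_AmsN x (AmsN x)

-- ===== LEMMAS AND PROOFS =====

-- the digit-cube sum, mathematically
def dsum : Nat → Int
  | n => if n = 0 then 0 else ((n % 10 : Nat) : Int) ^ 3 + dsum (n / 10)
decreasing_by exact Nat.div_lt_self (by omega) (by omega)

def csum (l : List Char) : Int := (l.map (fun c => ((c.toNat : Int) - 48) ^ 3)).sum

lemma digitChar_toNat (d : Nat) (h : d < 10) : (Nat.digitChar d).toNat = d + 48 := by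
  interval_cases d <;> decide

lemma csum_toDigitsCore (f : Nat) : ∀ (n : Nat) (acc : List Char), n < f →
    csum (Nat.toDigitsCore 10 f n acc) =
      ((n % 10 : Nat) : Int) ^ 3 + dsum (n / 10) + csum acc := by
  induction f with
  | zero => intro n acc h; omega
  | succ f ih =>
    intro n acc h
    simp only [Nat.toDigitsCore]
    have hd : (Nat.digitChar (n % 10)).toNat = n % 10 + 48 :=
      digitChar_toNat _ (Nat.mod_lt _ (by omega))
    by_cases h0 : n / 10 = 0
    · rw [if_pos h0, h0]
      simp only [csum, List.map_cons, List.sum_cons, hd]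
      rw [show dsum 0 = 0 by rw [dsum]; simp]
      push_cast
      ring
    · rw [if_neg h0]
      rw [ih (n / 10) _ (by omega)]
      rw [show dsum (n / 10) = ((n / 10 % 10 : Nat) : Int) ^ 3 + dsum (n / 10 / 10) by
        rw [dsum]; rw [if_neg h0]]
      simp only [csum, List.map_cons, List.sum_cons, hd]
      push_cast
      ring

lemma csum_toChars (x : Int) (hx : 0 < x) :
    csum (PySem.Int.toChars x) = dsum x.toNat := by
  simp only [PySem.Int.toChars]
  rw [if_neg (by omega)]
  unfold Nat.toDigits
  rw [csum_toDigitsCore (x.toNat + 1) x.toNat [] (by omega)]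
  rw [show dsum x.toNat = ((x.toNat % 10 : Nat) : Int) ^ 3 + dsum (x.toNat / 10) by
    rw [dsum]; rw [if_neg (by omega)]]
  rw [show csum [] = 0 from rfl]
  ring

lemma loop_eq_dsum (n : Nat) : ∀ (s : Int), AmsN.loop (n : Int) s = s + dsum n := by
  induction n using Nat.strong_induction_on with
  | _ n ih =>
    intro s
    unfold AmsN.loop
    by_cases h : (n : Int) > 0
    · rw [dif_pos h]
      have hn : 0 < n := by exact_mod_cast h
      have hfd : PySem.Int.floordiv (n : Int) 10 = ((n / 10 : Nat) : Int) := by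
        rw [PySem.Int.floordiv, Int.fdiv_eq_ediv_of_nonneg _ (by omega)]
        omega
      have hmd : PySem.Int.mod (n : Int) 10 = ((n % 10 : Nat) : Int) := by
        rw [PySem.Int.mod, Int.fmod_eq_emod_of_nonneg _ (by omega)]
        omega
      rw [hfd, hmd, ih (n / 10) (Nat.div_lt_self hn (by omega))]
      rw [show dsum n = ((n % 10 : Nat) : Int) ^ 3 + dsum (n / 10) by
        rw [dsum]; rw [if_neg (by omega)]]
      ring
    · rw [dif_neg h]
      have : n = 0 := by omega
      subst this
      rw [show dsum 0 = 0 by rw [dsum]; simp]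
      ring

lemma loop_eq_total (x : Int) :
    AmsN.loop x 0 =
      (if x > 0 then ((PySem.Int.toChars x).map (fun c => ((c.toNat : Int) - 48) ^ 3)).sum else 0) := by
  by_cases h : x > 0
  · rw [if_pos h]
    obtain ⟨n, rfl⟩ := Int.eq_ofNat_of_zero_le h.le
    rw [loop_eq_dsum n 0, zero_add]
    rw [show ((PySem.Int.toChars (n : Int)).map (fun c => ((c.toNat : Int) - 48) ^ 3)).sum
        = csum (PySem.Int.toChars (n : Int)) from rfl]
    rw [csum_toChars _ h]
    simp
  · rw [if_neg h]; unfold AmsN.loop; rw [dif_neg h]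

-- ===== VERDICT (by name: the statement is the Claim_ definition above) =====
theorem AmsN_spec : Claim_equal_AmsN := by
  intro x _
  unfold Spec_AmsN AmsN AmsN_alt
  rw [loop_eq_total x]
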